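-- pv_equiv track=rewrite | github.com/mpvalen/interfaz_grafica_adn | INTERFAZ/mcds_fop.py | t_eff_len
-- ===== SOURCE A (Python) =====
-- def t_eff_len(table):
--     list.reverse(table)
--     c = 0
--     l = len(table)
--     for fila in table:
--         if sum(fila[1:len(fila)]) == 0:
--             c += 1
--         else:
--             break
--     list.reverse(table)
--     # cuenta el largo efectivo de los datos distintos de 0 en una tabla.
--     return l - c
-- ===== SOURCE B (Python) =====
-- def t_eff_len(table):
--     last = 0
--     for i, fila in enumerate(table):
--         if sum(fila[1:]) != 0:
--             last = i + 1
--     return last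
-- ===== Notes on version B (the rewrite author's own statement) =====
-- stated objective: simpler
-- what changed: Replaces A's double list.reverse plus count-trailing-zero-rows-and-subtract strategy with a single forward enumerate pass that tracks the index after the last row whose tail sums nonzero.
import Mathlib
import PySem

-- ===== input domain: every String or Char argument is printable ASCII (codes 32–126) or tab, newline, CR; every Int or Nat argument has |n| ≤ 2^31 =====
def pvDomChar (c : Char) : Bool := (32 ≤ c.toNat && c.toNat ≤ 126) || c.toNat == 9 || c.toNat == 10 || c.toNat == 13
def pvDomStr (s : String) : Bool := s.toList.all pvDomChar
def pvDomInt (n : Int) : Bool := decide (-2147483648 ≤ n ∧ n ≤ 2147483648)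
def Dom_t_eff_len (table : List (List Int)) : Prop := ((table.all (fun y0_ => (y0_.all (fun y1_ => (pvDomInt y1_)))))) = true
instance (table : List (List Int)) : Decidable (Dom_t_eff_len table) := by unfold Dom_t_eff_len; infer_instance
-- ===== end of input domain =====

-- B replaces A's reverse/count-trailing-zero-rows/subtract with one forward enumerate pass
-- tracking the last significant row; A reverses the list in place and reverses it back (net
-- no observable mutation), the equivalence is about the return value.

-- ===== PORT A =====
-- the 'for fila in reversed table: count while tail-sum is 0 else break' loop
def t_eff_len_loop : List (List Int) → Int
  | [] => 0
  | fila :: rest =>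
      if (PySem.List.slice fila (some 1) (some (fila.length : Int))).sum = 0 then
        1 + t_eff_len_loop rest
      else 0

def t_eff_len (table : List (List Int)) : Int :=
  (table.length : Int) - t_eff_len_loop table.reverse

-- ===== PORT B =====
def t_eff_len_alt (table : List (List Int)) : Int :=
  (PySem.List.enumerate table 0).foldl
    (fun last p => if (PySem.List.slice p.2 (some 1) none).sum ≠ 0 then p.1 + 1 else last) 0

-- ===== PRECONDITION & SPEC =====
def Spec_t_eff_len (table : List (List Int)) (out : Int) : Prop := out = t_eff_len_alt table
instance (table : List (List Int)) (out : Int) : Decidable (Spec_t_eff_len table out) := by unfold Spec_t_eff_len; infer_instance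

-- ===== CLAIM (what is proved, stated in full; the proofs are below) =====
def Claim_equal_t_eff_len : Prop := ∀ (table : List (List Int)), Dom_t_eff_len table → Spec_t_eff_len table (t_eff_len table)

-- ===== LEMMAS AND PROOFS =====

-- both rows' slices are the row's tail
theorem slice_tail_a (fila : List Int) :
    PySem.List.slice fila (some 1) (some (fila.length : Int)) = fila.tail := by
  rw [show (some (1:Int)) = some ((1:Nat):Int) from rfl,
    PySem.List.slice_natCast fila 1 fila.length, List.drop_one,
    List.take_of_length_le (by simp)]

theorem slice_tail_b (fila : List Int) :
    PySem.List.slice fila (some 1) none = fila.tail := by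
  simpa using PySem.List.slice_from_one fila

-- the core identity, by induction on the list from the right
theorem key (xs : List (List Int)) :
    (PySem.List.enumerate xs 0).foldl
      (fun last p => if p.2.tail.sum ≠ 0 then p.1 + 1 else last) 0
    = (xs.length : Int) - t_eff_len_loop xs.reverse := by
  induction xs using List.reverseRecOn with
  | nil => simp [PySem.List.enumerate, t_eff_len_loop]
  | append_singleton xs x ih =>
    rw [PySem.List.enumerate_append, List.foldl_append]
    simp only [PySem.List.enumerate_cons, PySem.List.enumerate_nil, List.foldl_cons,
      List.foldl_nil, List.reverse_append, List.reverse_cons, List.reverse_nil,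
      List.nil_append, List.cons_append, t_eff_len_loop, slice_tail_a]
    by_cases h : (x.tail).sum = 0
    · rw [if_neg (by simpa using h), if_pos h, ih]
      push_cast [List.length_append]
      simp
      ring
    · rw [if_pos (by simpa using h), if_neg h]
      push_cast [List.length_append]
      simp

-- ===== VERDICT (by name: the statement is the Claim_ definition above) =====
theorem t_eff_len_spec : Claim_equal_t_eff_len := by
  intro table _
  unfold Spec_t_eff_len t_eff_len t_eff_len_alt
  simp only [slice_tail_b]
  exact (key table).symm
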